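-- pv_equiv track=rewrite | github.com/mocehu/python-apscheduler-visual | api.py | normalize_cron_args
-- ===== SOURCE A (Python) =====
-- def normalize_cron_args(data: dict) -> dict:
--     cleaned = {}
--     for k, v in data.items():
--         if k == "day_of_week" and not (0 <= v <= 6):
--             continue
--         if k == "week" and not (1 <= v <= 53):
--             continue
--         if k == "year" and v < 1970:
--             continue
--         if k == "month" and not (1 <= v <= 12):
--             continue
--         if k == "day" and not (1 <= v <= 31):
--             continue
--         if k == "hour" and not (0 <= v <= 23):
--             continue
--         if k in ("minute", "second") and not (0 <= v <= 59):
--             continue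
--         cleaned[k] = v
--     return cleaned
-- ===== SOURCE B (Python) =====
-- _RULES = [
--     ("day_of_week", 0, 6),
--     ("week", 1, 53),
--     ("year", 1970, None),
--     ("month", 1, 12),
--     ("day", 1, 31),
--     ("hour", 0, 23),
--     ("minute", 0, 59),
--     ("second", 0, 59),
-- ]
--
--
-- def normalize_cron_args(data: dict) -> dict:
--     items = list(data.items())
--     for key, lo, hi in _RULES:
--         items = [(k, v) for k, v in items
--                  if k != key or (lo <= v and (hi is None or v <= hi))]
--     return dict(items)
-- ===== Notes on version B (the rewrite author's own statement) =====
-- stated objective: alternative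
-- what changed: Replaced A's single pass with a per-item seven-branch if/continue cascade and incremental dict building by staged per-rule passes: for each (key, lo, hi) rule in a static table, one filter pass removes the out-of-range entries for that key, then the surviving pairs are rebuilt into a dict.
import Mathlib
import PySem

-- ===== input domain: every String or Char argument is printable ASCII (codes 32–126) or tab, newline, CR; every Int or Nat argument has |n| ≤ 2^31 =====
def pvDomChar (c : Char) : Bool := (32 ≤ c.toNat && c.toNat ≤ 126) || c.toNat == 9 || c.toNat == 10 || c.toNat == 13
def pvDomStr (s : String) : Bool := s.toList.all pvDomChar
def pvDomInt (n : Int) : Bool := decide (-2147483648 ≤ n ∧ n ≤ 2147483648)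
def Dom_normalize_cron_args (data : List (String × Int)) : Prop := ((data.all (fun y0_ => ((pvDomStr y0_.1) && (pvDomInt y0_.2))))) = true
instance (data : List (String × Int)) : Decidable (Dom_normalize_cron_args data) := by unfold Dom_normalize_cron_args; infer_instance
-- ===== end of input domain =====

-- B replaces A's single per-item if/continue cascade by staged per-rule passes: one filter
-- pass over the pairs for each (key, lo, hi) rule of a static table, then dict() of the
-- survivors (objective: alternative decomposition; same O(n) cost).


-- ===== PORT A =====
-- loop body of A's for-loop (the if/continue cascade, branches in source order)
def pvStepA (cleaned : PySem.Dict String Int) (kv : String × Int) : PySem.Dict String Int :=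
  let k := kv.1
  let v := kv.2
  if k == "day_of_week" && !(decide (0 ≤ v) && decide (v ≤ 6)) then cleaned
  else if k == "week" && !(decide (1 ≤ v) && decide (v ≤ 53)) then cleaned
  else if k == "year" && decide (v < 1970) then cleaned
  else if k == "month" && !(decide (1 ≤ v) && decide (v ≤ 12)) then cleaned
  else if k == "day" && !(decide (1 ≤ v) && decide (v ≤ 31)) then cleaned
  else if k == "hour" && !(decide (0 ≤ v) && decide (v ≤ 23)) then cleaned
  else if (k == "minute" || k == "second") && !(decide (0 ≤ v) && decide (v ≤ 59)) then cleaned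
  else cleaned.insert k v

def normalize_cron_args (data : List (String × Int)) : List (String × Int) :=
  (data.foldl pvStepA PySem.Dict.empty).items

-- ===== PORT B =====
-- the static _RULES table of Source B (key, lo, hi; hi = none means no upper bound)
def pvRules : List (String × Int × Option Int) :=
  [("day_of_week", (0, some 6)), ("week", (1, some 53)), ("year", (1970, none)),
   ("month", (1, some 12)), ("day", (1, some 31)), ("hour", (0, some 23)),
   ("minute", (0, some 59)), ("second", (0, some 59))]

-- the comprehension's condition for one rule: k != key or (lo <= v and (hi is None or v <= hi))
def pvKeep (r : String × Int × Option Int) (kv : String × Int) : Bool :=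
  kv.1 != r.1 || (decide (r.2.1 ≤ kv.2) && (match r.2.2 with | none => true | some h => decide (kv.2 ≤ h)))

-- for key, lo, hi in _RULES: items = [... filter ...]; return dict(items)
def normalize_cron_args_alt (data : List (String × Int)) : List (String × Int) :=
  (PySem.Dict.ofList (pvRules.foldl (fun items r => items.filter (pvKeep r)) data)).items

-- ===== PRECONDITION & SPEC =====
-- The Python parameter is a dict, whose keys are necessarily distinct; Pre_ states exactly that
-- for the association-list encoding (it excludes no input the Python function can receive).
def Pre_normalize_cron_args (data : List (String × Int)) : Prop :=
  (data.map Prod.fst).Nodup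
instance (data : List (String × Int)) : Decidable (Pre_normalize_cron_args data) := by
  unfold Pre_normalize_cron_args; infer_instance

def pvWitness_normalize_cron_args : (List (String × Int)) :=
  [("day_of_week", 3), ("year", 1800), ("foo", -5)]

def Spec_normalize_cron_args (data : List (String × Int)) (out : List (String × Int)) : Prop := out = normalize_cron_args_alt data
instance (data : List (String × Int)) (out : List (String × Int)) : Decidable (Spec_normalize_cron_args data out) := by unfold Spec_normalize_cron_args; infer_instance

-- ===== CLAIM (what is proved, stated in full; the proofs are below) =====
def Claim_equal_normalize_cron_args : Prop := ∀ (data : List (String × Int)), Dom_normalize_cron_args data → Pre_normalize_cron_args data → Spec_normalize_cron_args data (normalize_cron_args data)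

-- ===== LEMMAS AND PROOFS =====

-- staged filtering = one filter by the conjunction of all rule conditions
lemma pvFoldl_filter (rules : List (String × Int × Option Int)) (l : List (String × Int)) :
    rules.foldl (fun items r => items.filter (pvKeep r)) l
      = l.filter (fun kv => rules.all (fun r => pvKeep r kv)) := by
  induction rules generalizing l with
  | nil => simp
  | cons r rest ih =>
    simp only [List.foldl_cons, ih, List.filter_filter, List.all_cons]
    exact List.filter_congr (fun x _ => by rw [Bool.and_comm])

-- A's cascade keeps (k, v) exactly when every rule of B's table accepts it
lemma pvStepA_eq (d : PySem.Dict String Int) (kv : String × Int) :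
    pvStepA d kv
      = if pvRules.all (fun r => pvKeep r kv) then d.insert kv.1 kv.2 else d := by
  obtain ⟨k, v⟩ := kv
  by_cases h1 : k = "day_of_week"
  · subst h1; simp [pvStepA, pvRules, pvKeep]; split_ifs <;> first | rfl | (try simp_all) <;> omega
  by_cases h2 : k = "week"
  · subst h2; simp [pvStepA, pvRules, pvKeep]; split_ifs <;> first | rfl | (try simp_all) <;> omega
  by_cases h3 : k = "year"
  · subst h3; simp [pvStepA, pvRules, pvKeep]; split_ifs <;> first | rfl | (try simp_all) <;> omega
  by_cases h4 : k = "month"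
  · subst h4; simp [pvStepA, pvRules, pvKeep]; split_ifs <;> first | rfl | (try simp_all) <;> omega
  by_cases h5 : k = "day"
  · subst h5; simp [pvStepA, pvRules, pvKeep]; split_ifs <;> first | rfl | (try simp_all) <;> omega
  by_cases h6 : k = "hour"
  · subst h6; simp [pvStepA, pvRules, pvKeep]; split_ifs <;> first | rfl | (try simp_all) <;> omega
  by_cases h7 : k = "minute"
  · subst h7; simp [pvStepA, pvRules, pvKeep]; split_ifs <;> first | rfl | (try simp_all) <;> omega
  by_cases h8 : k = "second"
  · subst h8; simp [pvStepA, pvRules, pvKeep]; split_ifs <;> first | rfl | (try simp_all) <;> omega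
  · simp [pvStepA, pvRules, pvKeep, h1, h2, h3, h4, h5, h6, h7, h8]

-- loop invariant: over fresh distinct keys, A's fold appends exactly the all-rules-accepted pairs
lemma pvFold_items (data : List (String × Int)) (d : PySem.Dict String Int)
    (hnd : (data.map Prod.fst).Nodup)
    (hdis : ∀ kv ∈ data, d.contains kv.1 = false) :
    (data.foldl pvStepA d).items
      = d.items ++ data.filter (fun kv => pvRules.all (fun r => pvKeep r kv)) := by
  induction data generalizing d with
  | nil => simp
  | cons kv rest ih =>
    simp only [List.map_cons, List.nodup_cons] at hnd
    have hk : d.contains kv.1 = false := hdis kv (by simp)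
    simp only [List.foldl_cons, pvStepA_eq]
    by_cases hp : pvRules.all (fun r => pvKeep r kv) = true
    · rw [if_pos hp, ih (d.insert kv.1 kv.2) hnd.2]
      · rw [PySem.Dict.items_insert_of_not_contains _ _ hk]
        simp [hp]
      · intro kv' h'
        rw [PySem.Dict.contains_insert]
        have hne : kv'.1 ≠ kv.1 := by
          intro he
          exact hnd.1 (he ▸ List.mem_map_of_mem h')
        simp [hne, hdis kv' (List.mem_cons_of_mem _ h')]
    · rw [if_neg hp, ih d hnd.2 (fun kv' h' => hdis kv' (List.mem_cons_of_mem _ h'))]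
      simp [hp]

-- dict(items) over pairs with distinct keys returns exactly those pairs
lemma pvItems_ofList (l : List (String × Int)) (hnd : (l.map Prod.fst).Nodup) :
    (PySem.Dict.ofList l).items = l := by
  have h := PySem.Dict.items_foldl_insert_fresh l Prod.fst Prod.snd PySem.Dict.empty
    (fun a _ => by simp [PySem.Dict.contains_empty]) hnd
  simpa [PySem.Dict.ofList, PySem.Dict.update] using h

-- ===== VERDICT (by name: the statement is the Claim_ definition above) =====
theorem normalize_cron_args_spec : Claim_equal_normalize_cron_args := by
  intro data _ hpre
  unfold Spec_normalize_cron_args normalize_cron_args normalize_cron_args_alt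
  rw [pvFold_items data PySem.Dict.empty hpre (by simp [PySem.Dict.contains_empty])]
  rw [pvFoldl_filter, pvItems_ofList]
  · simp [PySem.Dict.empty]
  · exact (List.filter_sublist.map Prod.fst).nodup hpre
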